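-- pv_equiv track=rewrite | github.com/J-Prufrock/protein_llm | train_stage2.py | extract_conversation
-- ===== SOURCE A (Python) =====
-- from typing import Any
--
-- def extract_conversation(record: dict[str, Any]) -> tuple[str, str]:
--     """Read one human instruction and one assistant answer from the record."""
--
--     messages = list(record.get("messages", []))
--     # messages = record.get("messages", [])
--     # if not isinstance(messages, list):
--     #     raise ValueError("messages must be a list")
--
--     instruction = next((msg.get("value", "") for msg in messages if str(msg.get("from", "")).lower() == "human"), "")
--     answer = next((msg.get("value", "") for msg in messages if str(msg.get("from", "")).lower() != "human"), "")
--     instruction = str(instruction).strip()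
--     answer = str(answer).strip()
--     if not instruction or not answer:
--         raise ValueError("record does not contain a usable instruction/answer pair")
--     return instruction, answer
-- ===== SOURCE B (Python) =====
-- def extract_conversation(record):
--     """Read one human instruction and one assistant answer from the record."""
--     instruction = None
--     answer = None
--     for msg in record.get("messages", []):
--         f = str(msg.get("from", "")).lower()
--         if f == "human":
--             if instruction is None:
--                 instruction = msg.get("value", "")
--         elif answer is None:
--             answer = msg.get("value", "")
--     instruction = str("" if instruction is None else instruction).strip()
--     answer = str("" if answer is None else answer).strip()
--     if not instruction or not answer:
--         raise ValueError("record does not contain a usable instruction/answer pair")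
--     return instruction, answer
-- ===== Notes on version B (the rewrite author's own statement) =====
-- stated objective: alternative
-- what changed: Replaces the two separate early-stopping next() generator scans over messages with one fused loop that maintains two optional accumulators (instruction, answer) and fills each on its first match.
import Mathlib
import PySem

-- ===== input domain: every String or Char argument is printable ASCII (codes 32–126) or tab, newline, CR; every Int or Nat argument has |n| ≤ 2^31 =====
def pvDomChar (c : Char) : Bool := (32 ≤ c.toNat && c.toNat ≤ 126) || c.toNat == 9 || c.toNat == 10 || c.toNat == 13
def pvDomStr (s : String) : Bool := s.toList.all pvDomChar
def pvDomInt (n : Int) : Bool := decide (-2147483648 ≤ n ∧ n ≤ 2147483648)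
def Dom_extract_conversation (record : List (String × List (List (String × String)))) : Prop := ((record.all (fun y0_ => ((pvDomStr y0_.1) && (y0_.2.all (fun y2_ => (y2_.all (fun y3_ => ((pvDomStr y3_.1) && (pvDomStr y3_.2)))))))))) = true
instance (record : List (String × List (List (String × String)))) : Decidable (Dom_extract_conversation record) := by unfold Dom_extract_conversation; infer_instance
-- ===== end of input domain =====

-- B fuses A's two early-stopping next() scans into one loop with two optional accumulators (alternative decomposition, same cost); where Python A raises ValueError (blank instruction/answer) B raises the same, excluded by Pre_.

-- dict.get(k, dflt) on an association list: first match, else default (exact for Python dicts, whose keys are unique)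
def pvGetD {α : Type} (d : List (String × α)) (k : String) (dflt : α) : α :=
  ((d.find? (fun kv => kv.1 == k)).map (fun kv => kv.2)).getD dflt

-- ===== PORT A =====
def extract_conversation (record : List (String × List (List (String × String)))) : String × String :=
  let messages := pvGetD record "messages" []
  -- next((msg.get("value","") for msg in messages if str(msg.get("from","")).lower() == "human"), "")
  let instruction := ((messages.find? (fun m => PySem.Str.lower (pvGetD m "from" "") == "human")).map
      (fun m => pvGetD m "value" "")).getD ""
  -- next((msg.get("value","") for msg in messages if str(msg.get("from","")).lower() != "human"), "")
  let answer := ((messages.find? (fun m => !(PySem.Str.lower (pvGetD m "from" "") == "human"))).map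
      (fun m => pvGetD m "value" "")).getD ""
  -- the 'raise' on blank instruction/answer is excluded by Pre_extract_conversation
  (PySem.Str.strip instruction, PySem.Str.strip answer)

-- ===== PORT B =====
-- the fused for-loop of Source B: scans messages once, filling each optional accumulator on its first match
def pvLoop : List (List (String × String)) → Option String → Option String → Option String × Option String
  | [], instruction, answer => (instruction, answer)
  | msg :: ms, instruction, answer =>
    let f := PySem.Str.lower (pvGetD msg "from" "")
    if f == "human" then
      if instruction.isNone then pvLoop ms (some (pvGetD msg "value" "")) answer
      else pvLoop ms instruction answer
    else
      if answer.isNone then pvLoop ms instruction (some (pvGetD msg "value" ""))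
      else pvLoop ms instruction answer

def extract_conversation_alt (record : List (String × List (List (String × String)))) : String × String :=
  let p := pvLoop (pvGetD record "messages" []) none none
  -- the 'raise' on blank instruction/answer is excluded by Pre_extract_conversation
  (PySem.Str.strip (p.1.getD ""), PySem.Str.strip (p.2.getD ""))

-- ===== PRECONDITION & SPEC =====
-- Pre_'s own lookup helpers (independent of the ports)
def pvPreGetD {α : Type} (d : List (String × α)) (k : String) (dflt : α) : α :=
  ((d.find? (fun kv => kv.1 == k)).map (fun kv => kv.2)).getD dflt
def pvPreFirst (p : Bool → Bool) (ms : List (List (String × String))) : String :=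
  ((ms.find? (fun m => p (PySem.Str.lower (pvPreGetD m "from" "") == "human"))).map
    (fun m => pvPreGetD m "value" "")).getD ""
-- Pre_ excludes exactly the inputs on which A raises ValueError: those whose first human message
-- has a blank (after strip) value or absent, or whose first non-human message does.
def Pre_extract_conversation (record : List (String × List (List (String × String)))) : Prop :=
  let messages := pvPreGetD record "messages" []
  PySem.Str.strip (pvPreFirst (fun b => b) messages) ≠ "" ∧
  PySem.Str.strip (pvPreFirst (fun b => !b) messages) ≠ ""
instance (record : List (String × List (List (String × String)))) : Decidable (Pre_extract_conversation record) := by unfold Pre_extract_conversation; infer_instance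

def pvWitness_extract_conversation : (List (String × List (List (String × String)))) :=
  [("messages", [[("from", "human"), ("value", " hi ")], [("from", "gpt"), ("value", "yo")]])]

def Spec_extract_conversation (record : List (String × List (List (String × String)))) (out : String × String) : Prop := out = extract_conversation_alt record
instance (record : List (String × List (List (String × String)))) (out : String × String) : Decidable (Spec_extract_conversation record out) := by unfold Spec_extract_conversation; infer_instance

-- ===== CLAIM (what is proved, stated in full; the proofs are below) =====
def Claim_equal_extract_conversation : Prop := ∀ (record : List (String × List (List (String × String)))), Dom_extract_conversation record → Pre_extract_conversation record → Spec_extract_conversation record (extract_conversation record)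

-- ===== LEMMAS AND PROOFS =====
-- the loop invariant: pvLoop fills each unset slot with the corresponding first match
theorem pvLoop_eq (ms : List (List (String × String))) (i a : Option String) :
    pvLoop ms i a =
      (i.orElse (fun _ => (ms.find? (fun m => PySem.Str.lower (pvGetD m "from" "") == "human")).map
        (fun m => pvGetD m "value" "")),
       a.orElse (fun _ => (ms.find? (fun m => !(PySem.Str.lower (pvGetD m "from" "") == "human"))).map
        (fun m => pvGetD m "value" ""))) := by
  induction ms generalizing i a with
  | nil => cases i <;> cases a <;> simp [pvLoop]
  | cons m ms ih =>
    by_cases h : (PySem.Str.lower (pvGetD m "from" "") == "human") = true <;>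
      cases i <;> cases a <;>
      simp [pvLoop, h, ih, List.find?]

-- ===== VERDICT (by name: the statement is the Claim_ definition above) =====
theorem extract_conversation_spec : Claim_equal_extract_conversation := by
  intro record _ _
  unfold Spec_extract_conversation extract_conversation extract_conversation_alt
  simp [pvLoop_eq]
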